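-- pv_equiv track=rewrite | github.com/NilsHasNoGithub/mlip_challenge_2 | library/data/utils.py | make_label_map
-- ===== SOURCE A (Python) =====
-- from typing import Any, Dict, Iterable, List, Tuple
--
-- def make_label_map(labels: List[str]) -> Tuple[Dict[str, int], Dict[int, str]]:
--     c = 0
--     encoder = {}
--
--     for l in labels:
--         if l in encoder.keys():
--             continue
--
--         encoder[l] = c
--         c += 1
--
--     return encoder, {v: k for (k, v) in encoder.items()}
-- ===== SOURCE B (Python) =====
-- def make_label_map(labels):
--     first = {}
--     for i, l in enumerate(labels):
--         first.setdefault(l, i)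
--     order = sorted(first, key=lambda l: first[l])
--     encoder = {l: c for c, l in enumerate(order)}
--     decoder = {c: l for c, l in enumerate(order)}
--     return encoder, decoder
-- ===== Notes on version B (the rewrite author's own statement) =====
-- stated objective: alternative
-- what changed: Instead of A's fused loop that membership-tests and increments a running counter, B records each label's first-occurrence index via setdefault, then sorts the distinct labels by that index and enumerates the sorted list to build both dicts; correctness rests on first-occurrence indices being increasing along insertion order.
import Mathlib
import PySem

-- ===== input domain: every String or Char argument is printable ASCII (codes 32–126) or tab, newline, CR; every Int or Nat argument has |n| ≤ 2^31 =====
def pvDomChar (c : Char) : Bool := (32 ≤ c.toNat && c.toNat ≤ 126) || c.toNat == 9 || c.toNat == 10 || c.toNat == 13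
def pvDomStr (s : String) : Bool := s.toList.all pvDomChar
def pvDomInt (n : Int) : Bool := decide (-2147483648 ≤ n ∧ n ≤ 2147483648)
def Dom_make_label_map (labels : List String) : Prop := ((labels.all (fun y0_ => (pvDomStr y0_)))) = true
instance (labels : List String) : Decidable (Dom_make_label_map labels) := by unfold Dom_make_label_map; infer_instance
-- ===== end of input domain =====

-- B records first-occurrence indices and sorts labels by them instead of A's fused
-- membership-check + running-counter loop; alternative algorithm of similar cost.


-- ===== PORT A =====
def make_label_map (labels : List String) : (List (String × Int)) × (List (Int × String)) :=
  let st := labels.foldl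
    (fun (st : Int × PySem.Dict String Int) l =>
      if st.2.contains l then st else (st.1 + 1, st.2.insert l st.1))
    (0, PySem.Dict.empty)
  (st.2.items, st.2.items.map (fun p => (p.2, p.1)))

-- ===== PORT B =====
def make_label_map_alt (labels : List String) : (List (String × Int)) × (List (Int × String)) :=
  let first := (PySem.List.enumerate labels).foldl
    (fun (d : PySem.Dict String Int) p => d.setdefault p.2 p.1) PySem.Dict.empty
  -- key `first[l]` is exact as getD: every sorted element is a key of `first`
  let order := PySem.List.sorted first.keys (fun l => first.getD l 0) false
  let encoder := (PySem.List.enumerate order).map (fun p => (p.2, p.1))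
  let decoder := PySem.List.enumerate order
  (encoder, decoder)

-- ===== PRECONDITION & SPEC =====
def Spec_make_label_map (labels : List String) (out : (List (String × Int)) × (List (Int × String))) : Prop := out = make_label_map_alt labels
instance (labels : List String) (out : (List (String × Int)) × (List (Int × String))) : Decidable (Spec_make_label_map labels out) := by unfold Spec_make_label_map; infer_instance

-- ===== CLAIM (what is proved, stated in full; the proofs are below) =====
def Claim_equal_make_label_map : Prop := ∀ (labels : List String), Dom_make_label_map labels → Spec_make_label_map labels (make_label_map labels)

-- ===== LEMMAS AND PROOFS =====

/-- A-side: the dict A has built after processing exactly the distinct labels `u` (in order). -/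
def pvEncDict (u : List String) : PySem.Dict String Int :=
  PySem.Dict.mk ((PySem.List.enumerate u).map (fun p => (p.2, p.1)))

theorem pvEncDict_keys (u : List String) : (pvEncDict u).keys = u := by
  simp [pvEncDict, PySem.Dict.keys, List.map_map, Function.comp_def,
        PySem.List.map_snd_enumerate]

theorem pvEncDict_insert (u : List String) (l : String) (h : l ∉ u) :
    (pvEncDict u).insert l (u.length : Int) = pvEncDict (u ++ [l]) := by
  apply PySem.Dict.ext
  rw [PySem.Dict.items_insert_of_not_contains]
  · simp [pvEncDict, PySem.List.enumerate_append]
  · rw [PySem.Dict.contains_eq_decide_mem_keys, pvEncDict_keys]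
    simpa using h

theorem pvFoldl_main (labels u : List String) (hnd : u.Nodup) :
    labels.foldl
      (fun (st : Int × PySem.Dict String Int) l =>
        if st.2.contains l then st else (st.1 + 1, st.2.insert l st.1))
      ((u.length : Int), pvEncDict u)
    = (((PySem.Set.update u labels).length : Int), pvEncDict (PySem.Set.update u labels)) := by
  induction labels generalizing u with
  | nil => simp [PySem.Set.update]
  | cons l ls ih =>
    have hcont : (pvEncDict u).contains l = decide (l ∈ u) := by
      rw [PySem.Dict.contains_eq_decide_mem_keys, pvEncDict_keys]
    by_cases hm : l ∈ u
    · have hupd : PySem.Set.update u (l :: ls) = PySem.Set.update u ls := by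
        simp [PySem.Set.update, PySem.Set.add, PySem.Set.contains, hm]
      rw [hupd, List.foldl_cons]
      simp only [hcont, hm, decide_true, if_true]
      exact ih u hnd
    · have hupd : PySem.Set.update u (l :: ls) = PySem.Set.update (u ++ [l]) ls := by
        simp [PySem.Set.update, PySem.Set.add, PySem.Set.contains, hm]
      rw [hupd, List.foldl_cons]
      simp only [hcont, hm, decide_false, Bool.false_eq_true, if_false]
      rw [pvEncDict_insert u l hm]
      have : ((u.length : Int) + 1) = ((u ++ [l]).length : Int) := by
        simp
      rw [this]
      exact ih (u ++ [l]) (by simp [List.nodup_append, hnd]; exact fun a ha h => hm (h ▸ ha))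

/-- B-side: the (label, first-occurrence index) pairs B's setdefault loop appends,
    given the labels already `seen`. -/
def pvFI (xs : List String) (s : Int) (seen : List String) : List (String × Int) :=
  match xs with
  | [] => []
  | x :: t => if x ∈ seen then pvFI t (s + 1) seen else (x, s) :: pvFI t (s + 1) (seen ++ [x])

theorem pvFI_items (xs : List String) (s : Int) (d : PySem.Dict String Int)
    (hnd : d.keys.Nodup) :
    ((PySem.List.enumerate xs s).foldl
      (fun (d : PySem.Dict String Int) p => d.setdefault p.2 p.1) d).items
    = d.items ++ pvFI xs s d.keys := by
  induction xs generalizing s d with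
  | nil => simp [PySem.List.enumerate_nil, pvFI]
  | cons x t ih =>
    rw [PySem.List.enumerate_cons, List.foldl_cons]
    by_cases hm : x ∈ d.keys
    · have hc : d.contains x = true := by
        rw [PySem.Dict.contains_eq_decide_mem_keys]; simp [hm]
      have hset : d.setdefault ((s, x) : Int × String).2 ((s, x) : Int × String).1 = d :=
        PySem.Dict.setdefault_of_contains d _ hc
      rw [hset, ih (s + 1) d hnd]
      simp [pvFI, hm]
    · have hc : d.contains x = false := by
        rw [PySem.Dict.contains_eq_decide_mem_keys]; simp [hm]
      have hset : d.setdefault ((s, x) : Int × String).2 ((s, x) : Int × String).1 = d.insert x s :=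
        PySem.Dict.setdefault_of_not_contains d _ hc
      have hkeys : (d.insert x s).keys = d.keys ++ [x] :=
        PySem.Dict.keys_insert_of_not_contains d s hc
      rw [hset, ih (s + 1) _ (by rw [hkeys]; simp [List.nodup_append, hnd]; exact fun a ha h => hm (h ▸ ha)), hkeys,
          PySem.Dict.items_insert_of_not_contains d s hc]
      simp [pvFI, hm]

theorem pvFI_fst (xs : List String) (s : Int) (seen : List String) :
    seen ++ (pvFI xs s seen).map Prod.fst = PySem.Set.update seen xs := by
  induction xs generalizing s seen with
  | nil => simp [pvFI, PySem.Set.update]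
  | cons x t ih =>
    by_cases hm : x ∈ seen
    · have : PySem.Set.update seen (x :: t) = PySem.Set.update seen t := by
        simp [PySem.Set.update, PySem.Set.add, PySem.Set.contains, hm]
      rw [this, pvFI]
      simp only [hm, if_true]
      exact ih (s + 1) seen
    · have : PySem.Set.update seen (x :: t) = PySem.Set.update (seen ++ [x]) t := by
        simp [PySem.Set.update, PySem.Set.add, PySem.Set.contains, hm]
      rw [this, pvFI]
      simp only [hm, if_false]
      rw [← ih (s + 1) (seen ++ [x])]
      simp

theorem pvFI_snd_le (xs : List String) (s : Int) (seen : List String) :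
    ∀ p ∈ pvFI xs s seen, s ≤ p.2 := by
  induction xs generalizing s seen with
  | nil => simp [pvFI]
  | cons x t ih =>
    intro p hp
    rw [pvFI] at hp
    split_ifs at hp with hm
    · exact le_trans (by omega) (ih (s + 1) seen p hp)
    · rw [List.mem_cons] at hp
      rcases hp with rfl | hp
      · simp
      · exact le_trans (by omega) (ih (s + 1) (seen ++ [x]) p hp)

theorem pvFI_pairwise (xs : List String) (s : Int) (seen : List String) :
    (pvFI xs s seen).Pairwise (fun a b => a.2 < b.2) := by
  induction xs generalizing s seen with
  | nil => simp [pvFI]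
  | cons x t ih =>
    rw [pvFI]
    split_ifs with hm
    · exact ih (s + 1) seen
    · exact List.Pairwise.cons
        (fun p hp => lt_of_lt_of_le (by omega) (pvFI_snd_le t (s + 1) (seen ++ [x]) p hp))
        (ih (s + 1) (seen ++ [x]))

theorem pvDedup_eq_update (labels : List String) :
    PySem.Set.update ([] : List String) labels = PySem.List.dedup labels := by
  simp [PySem.List.dedup_eq_ofList, PySem.Set.ofList_eq_foldl, PySem.Set.update]

-- ===== VERDICT (by name: the statement is the Claim_ definition above) =====
theorem make_label_map_spec : Claim_equal_make_label_map := by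
  intro labels _
  show make_label_map labels = make_label_map_alt labels
  have hA : make_label_map labels =
      ((PySem.List.enumerate (PySem.List.dedup labels)).map (fun p => (p.2, p.1)),
        PySem.List.enumerate (PySem.List.dedup labels)) := by
    unfold make_label_map
    have h0 : (0 : Int) = (([] : List String).length : Int) := by simp
    have he : (PySem.Dict.empty : PySem.Dict String Int) = pvEncDict [] := rfl
    rw [h0, he, pvFoldl_main labels [] (by simp), pvDedup_eq_update labels]
    simp [pvEncDict, List.map_map, Function.comp_def]
  -- B's first-occurrence dict as a literal item list
  have hFd : (PySem.List.enumerate labels).foldl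
      (fun (d : PySem.Dict String Int) p => d.setdefault p.2 p.1) PySem.Dict.empty
      = PySem.Dict.mk (pvFI labels 0 []) := by
    apply PySem.Dict.ext
    rw [pvFI_items labels 0 PySem.Dict.empty (by rw [PySem.Dict.keys_empty]; exact List.nodup_nil)]
    rfl
  have hkeys : (PySem.Dict.mk (pvFI labels 0 [])).keys = PySem.List.dedup labels := by
    rw [PySem.Dict.keys_mk, ← pvDedup_eq_update labels, ← pvFI_fst labels 0 []]
    simp
  have hndk : (PySem.Dict.mk (pvFI labels 0 [])).keys.Nodup := by
    rw [hkeys]; exact PySem.List.nodup_dedup labels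
  have hpw : (PySem.Dict.mk (pvFI labels 0 [])).keys.Pairwise
      (fun a b => (PySem.Dict.mk (pvFI labels 0 [])).getD a 0 ≤ (PySem.Dict.mk (pvFI labels 0 [])).getD b 0) := by
    rw [PySem.Dict.keys_mk, List.pairwise_map]
    refine List.Pairwise.imp_of_mem ?_ (pvFI_pairwise labels 0 [])
    intro a b ha hb hlt
    rw [PySem.Dict.getD_of_mem_items _ (show (a.1, a.2) ∈ (PySem.Dict.mk (pvFI labels 0 [])).items from ha) hndk,
        PySem.Dict.getD_of_mem_items _ (show (b.1, b.2) ∈ (PySem.Dict.mk (pvFI labels 0 [])).items from hb) hndk]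
    exact le_of_lt hlt
  have horder : PySem.List.sorted (PySem.Dict.mk (pvFI labels 0 [])).keys
      (fun l => (PySem.Dict.mk (pvFI labels 0 [])).getD l 0) false = PySem.List.dedup labels := by
    rw [PySem.List.sorted_eq_self_of_pairwise _ _ hpw, hkeys]
  have hB : make_label_map_alt labels =
      ((PySem.List.enumerate (PySem.List.dedup labels)).map (fun p => (p.2, p.1)),
        PySem.List.enumerate (PySem.List.dedup labels)) := by
    unfold make_label_map_alt
    rw [hFd]
    simp only [horder]
  rw [hA, hB]
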